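-- pv_equiv track=rewrite | github.com/adarsh9780/inquira-ce | backend/app/services/llm_provider_catalog.py | model_supports_vision
-- ===== SOURCE A (Python) =====
-- SUPPORTED_LLM_PROVIDERS: tuple[str, ...] = (
--     "openrouter",
--     "openai",
--     "anthropic",
--     "ollama",
-- )
--
-- def normalize_llm_provider(provider: str) -> str:
--     value = str(provider or "").strip().lower()
--     if value in SUPPORTED_LLM_PROVIDERS:
--         return value
--     return "openrouter"
--
-- def model_supports_vision(provider: str, model: str) -> bool:
--     normalized_provider = normalize_llm_provider(provider)
--     normalized_model = str(model or "").strip().lower()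
--     if not normalized_model:
--         return False
--
--     if normalized_provider == "anthropic":
--         return "claude-3" in normalized_model or "claude-sonnet-4" in normalized_model
--
--     if normalized_provider in {"openrouter", "openai"}:
--         vision_markers = (
--             "gpt-4o",
--             "gpt-4.1",
--             "gemini",
--             "claude-3",
--             "claude-sonnet-4",
--             "qwen-vl",
--             "llava",
--             "pixtral",
--             "vision",
--         )
--         return any(marker in normalized_model for marker in vision_markers)
--
--     if normalized_provider == "ollama":
--         return any(marker in normalized_model for marker in ("llava", "vision", "moondream", "minicpm-v"))
--
--     return False
-- ===== SOURCE B (Python) =====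
-- SUPPORTED_LLM_PROVIDERS: tuple[str, ...] = (
--     "openrouter",
--     "openai",
--     "anthropic",
--     "ollama",
-- )
--
-- def normalize_llm_provider(provider: str) -> str:
--     value = str(provider or "").strip().lower()
--     if value in SUPPORTED_LLM_PROVIDERS:
--         return value
--     return "openrouter"
--
-- # Inverted index: each vision marker, paired with the providers for which it counts.
-- # (Correct by construction: a row (m, ps) exists iff marker m appears in provider p's
-- # marker tuple of the original per-provider tables, for every p in ps.)
-- _MARKER_PROVIDERS: tuple[tuple[str, tuple[str, ...]], ...] = (
--     ("gpt-4o", ("openrouter", "openai")),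
--     ("gpt-4.1", ("openrouter", "openai")),
--     ("gemini", ("openrouter", "openai")),
--     ("claude-3", ("anthropic", "openrouter", "openai")),
--     ("claude-sonnet-4", ("anthropic", "openrouter", "openai")),
--     ("qwen-vl", ("openrouter", "openai")),
--     ("llava", ("openrouter", "openai", "ollama")),
--     ("pixtral", ("openrouter", "openai")),
--     ("vision", ("openrouter", "openai", "ollama")),
--     ("moondream", ("ollama",)),
--     ("minicpm-v", ("ollama",)),
-- )
--
-- def model_supports_vision(provider: str, model: str) -> bool:
--     normalized_provider = normalize_llm_provider(provider)
--     normalized_model = str(model or "").strip().lower()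
--     if not normalized_model:
--         return False
--     # one uniform scan over the inverted marker table: no per-provider dispatch
--     return any(normalized_provider in providers and marker in normalized_model
--                for marker, providers in _MARKER_PROVIDERS)
-- ===== Notes on version B (the rewrite author's own statement) =====
-- stated objective: alternative
-- what changed: Inverted the data flow: instead of dispatching on the provider to select its marker tuple and scanning it, B keeps one flat inverted index of (marker, supporting-providers) rows and does a single uniform scan testing provider membership and marker containment per row.
import Mathlib
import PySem

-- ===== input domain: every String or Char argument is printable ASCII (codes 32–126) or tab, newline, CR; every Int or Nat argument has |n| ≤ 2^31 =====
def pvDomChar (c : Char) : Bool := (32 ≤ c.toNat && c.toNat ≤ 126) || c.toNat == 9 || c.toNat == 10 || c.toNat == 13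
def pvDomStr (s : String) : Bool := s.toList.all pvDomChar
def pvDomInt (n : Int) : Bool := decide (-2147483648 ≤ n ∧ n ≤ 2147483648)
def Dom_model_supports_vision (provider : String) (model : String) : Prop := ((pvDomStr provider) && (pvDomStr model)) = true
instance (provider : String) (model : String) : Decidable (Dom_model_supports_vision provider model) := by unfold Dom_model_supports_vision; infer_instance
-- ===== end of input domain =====

-- B inverts the data flow: one flat (marker, supporting-providers) index scanned uniformly, instead of A's per-provider branch dispatch (alternative; same cost).

-- ===== PORT A =====
-- shared module-level helper (used verbatim by both Source A and Source B)
def SUPPORTED_LLM_PROVIDERS : List String := ["openrouter", "openai", "anthropic", "ollama"]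

def normalize_llm_provider (provider : String) : String :=
  let value := PySem.Str.lower (PySem.Str.strip provider)  -- str(provider or "") is provider itself for a str argument
  if value ∈ SUPPORTED_LLM_PROVIDERS then value else "openrouter"

def model_supports_vision (provider : String) (model : String) : Bool :=
  let normalized_provider := normalize_llm_provider provider
  let normalized_model := PySem.Str.lower (PySem.Str.strip model)
  if normalized_model = "" then false
  else if normalized_provider = "anthropic" then
    PySem.Str.isIn "claude-3" normalized_model || PySem.Str.isIn "claude-sonnet-4" normalized_model
  else if normalized_provider = "openrouter" ∨ normalized_provider = "openai" then
    (["gpt-4o", "gpt-4.1", "gemini", "claude-3", "claude-sonnet-4",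
      "qwen-vl", "llava", "pixtral", "vision"]).any
      (fun marker => PySem.Str.isIn marker normalized_model)
  else if normalized_provider = "ollama" then
    (["llava", "vision", "moondream", "minicpm-v"]).any
      (fun marker => PySem.Str.isIn marker normalized_model)
  else false

-- ===== PORT B =====
-- inverted index: each marker with the providers for which it counts
def MARKER_PROVIDERS : List (String × List String) :=
  [("gpt-4o", ["openrouter", "openai"]),
   ("gpt-4.1", ["openrouter", "openai"]),
   ("gemini", ["openrouter", "openai"]),
   ("claude-3", ["anthropic", "openrouter", "openai"]),
   ("claude-sonnet-4", ["anthropic", "openrouter", "openai"]),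
   ("qwen-vl", ["openrouter", "openai"]),
   ("llava", ["openrouter", "openai", "ollama"]),
   ("pixtral", ["openrouter", "openai"]),
   ("vision", ["openrouter", "openai", "ollama"]),
   ("moondream", ["ollama"]),
   ("minicpm-v", ["ollama"])]

def model_supports_vision_alt (provider : String) (model : String) : Bool :=
  let normalized_provider := normalize_llm_provider provider
  let normalized_model := PySem.Str.lower (PySem.Str.strip model)
  if normalized_model = "" then false
  else
    MARKER_PROVIDERS.any
      (fun row => (normalized_provider ∈ row.2) && PySem.Str.isIn row.1 normalized_model)

-- ===== PRECONDITION & SPEC =====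
def Spec_model_supports_vision (provider : String) (model : String) (out : Bool) : Prop := out = model_supports_vision_alt provider model
instance (provider : String) (model : String) (out : Bool) : Decidable (Spec_model_supports_vision provider model out) := by unfold Spec_model_supports_vision; infer_instance

-- ===== CLAIM (what is proved, stated in full; the proofs are below) =====
def Claim_equal_model_supports_vision : Prop := ∀ (provider : String) (model : String), Dom_model_supports_vision provider model → Spec_model_supports_vision provider model (model_supports_vision provider model)

-- ===== LEMMAS AND PROOFS =====

-- the normalized provider is always one of the four supported names
lemma normalize_cases (provider : String) :
    normalize_llm_provider provider ∈ SUPPORTED_LLM_PROVIDERS := by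
  unfold normalize_llm_provider
  simp only []
  split
  · assumption
  · simp [SUPPORTED_LLM_PROVIDERS]

-- branch-by-branch agreement once the normalized provider is pinned to a literal
set_option maxHeartbeats 2000000 in
lemma body_eq (np : String) (hnp : np ∈ SUPPORTED_LLM_PROVIDERS) (nm : String) :
    (if nm = "" then false
     else if np = "anthropic" then
       PySem.Str.isIn "claude-3" nm || PySem.Str.isIn "claude-sonnet-4" nm
     else if np = "openrouter" ∨ np = "openai" then
       (["gpt-4o", "gpt-4.1", "gemini", "claude-3", "claude-sonnet-4",
         "qwen-vl", "llava", "pixtral", "vision"]).any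
         (fun marker => PySem.Str.isIn marker nm)
     else if np = "ollama" then
       (["llava", "vision", "moondream", "minicpm-v"]).any
         (fun marker => PySem.Str.isIn marker nm)
     else false)
    = (if nm = "" then false
       else MARKER_PROVIDERS.any
         (fun row => (np ∈ row.2) && PySem.Str.isIn row.1 nm)) := by
  simp only [SUPPORTED_LLM_PROVIDERS, List.mem_cons, List.not_mem_nil, or_false] at hnp
  rcases hnp with h | h | h | h <;> subst h <;>
    by_cases hnm : nm = "" <;>
    simp only [MARKER_PROVIDERS, List.any_cons, List.any_nil, List.mem_cons, List.not_mem_nil, hnm,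
      if_neg, if_pos, String.reduceEq, or_self, or_false, false_or, or_true, true_or,
      decide_true, decide_false, Bool.true_and, Bool.false_and, Bool.or_false, Bool.false_or,
      ite_false, ite_true, reduceIte] <;> simp [Bool.or_comm, Bool.or_left_comm, Bool.or_assoc]

-- ===== VERDICT (by name: the statement is the Claim_ definition above) =====
theorem model_supports_vision_spec : Claim_equal_model_supports_vision := by
  intro provider model _
  unfold Spec_model_supports_vision model_supports_vision model_supports_vision_alt
  exact body_eq (normalize_llm_provider provider) (normalize_cases provider)
    (PySem.Str.lower (PySem.Str.strip model))
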